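-- pv_equiv track=rewrite | github.com/arsalansiddique1/ttds_cw3 | backfront/boolean_search_db.py | proximity_2_terms
-- ===== SOURCE A (Python) =====
-- def proximity_2_terms(term1_locs, term2_locs, dist, phrase=False):
--     results = []
--     for key in term1_locs:
--             term1_doc = key
--             term1_pos = term1_locs[key]
--
--             for key2 in term2_locs:
--                     term2_doc = key2
--                     term2_pos = term2_locs[key2]
--
--                     if term1_doc == term2_doc:
--                         for p in term1_pos:
--                             for p2 in term2_pos:
--                                 if abs(p-p2) <= dist and not phrase:
--                                     results.append(key)
--                                 elif p-p2 == -1 and phrase: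
--                                     results.append(key)
--     return results
-- ===== SOURCE B (Python) =====
-- import bisect
-- from collections import Counter
--
-- def proximity_2_terms(term1_locs, term2_locs, dist, phrase=False):
--     results = []
--     for doc, pos1 in term1_locs.items():
--         if doc not in term2_locs:
--             continue
--         pos2 = term2_locs[doc]
--         if phrase:
--             cnt = Counter(pos2)
--             n = sum(cnt[p + 1] for p in pos1)
--         else:
--             srt = sorted(pos2)
--             n = sum(bisect.bisect_right(srt, p + dist) - bisect.bisect_left(srt, p - dist)
--                     for p in pos1)
--         results.extend([doc] * n)
--     return results
-- ===== Notes on version B (the rewrite author's own statement) =====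
-- stated objective: faster
-- what changed: Replaces the nested doc-by-doc scan with a direct dict membership test on term2_locs and replaces the quadratic position-pair loops with a Counter lookup (phrase) or a sort-plus-binary-search window count (proximity), emitting each doc via list repetition.
import Mathlib
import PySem

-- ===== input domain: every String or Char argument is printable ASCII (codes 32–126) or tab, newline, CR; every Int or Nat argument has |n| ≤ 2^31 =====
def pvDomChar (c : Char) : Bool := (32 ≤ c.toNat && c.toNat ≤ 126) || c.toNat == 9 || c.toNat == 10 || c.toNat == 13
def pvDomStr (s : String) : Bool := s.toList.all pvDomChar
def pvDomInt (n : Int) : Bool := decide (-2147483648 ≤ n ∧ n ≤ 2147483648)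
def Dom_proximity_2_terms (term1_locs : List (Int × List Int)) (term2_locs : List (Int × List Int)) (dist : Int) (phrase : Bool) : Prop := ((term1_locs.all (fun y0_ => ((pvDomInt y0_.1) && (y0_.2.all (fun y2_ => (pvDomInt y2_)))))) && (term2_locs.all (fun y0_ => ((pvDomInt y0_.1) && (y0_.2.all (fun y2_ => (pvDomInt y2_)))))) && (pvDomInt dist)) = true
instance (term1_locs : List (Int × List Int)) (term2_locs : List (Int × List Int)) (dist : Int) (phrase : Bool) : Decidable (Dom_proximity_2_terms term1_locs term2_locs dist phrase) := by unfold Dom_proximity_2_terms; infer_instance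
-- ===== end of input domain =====

-- B replaces A's nested doc-by-doc scan by a dict lookup and the quadratic position-pair
-- loops by a Counter lookup (phrase) / sort-plus-binary-search window count (proximity);
-- equal return value on dict-shaped inputs (distinct keys), measured faster on large inputs.

-- ===== PORT A =====
def proximity_2_terms (term1_locs : List (Int × List Int)) (term2_locs : List (Int × List Int)) (dist : Int) (phrase : Bool) : List Int :=
  term1_locs.foldl (fun results kv =>
    term2_locs.foldl (fun results kv2 =>
      if kv.1 == kv2.1 then
        kv.2.foldl (fun results p =>
          kv2.2.foldl (fun results p2 =>
            if decide (|p - p2| ≤ dist) && !phrase then results ++ [kv.1]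
            else if (p - p2 == -1) && phrase then results ++ [kv.1]
            else results) results) results
      else results) results) []

-- ===== PORT B =====
def proximity_2_terms_alt (term1_locs : List (Int × List Int)) (term2_locs : List (Int × List Int)) (dist : Int) (phrase : Bool) : List Int :=
  term1_locs.foldl (fun results kv =>
    match (PySem.Dict.mk term2_locs).get? kv.1 with
    | none => results
    | some pos2 =>
      let n : Int :=
        if phrase then
          let cnt := PySem.Dict.counter pos2
          (kv.2.map (fun p => cnt.getD (p + 1) 0)).sum
        else
          let srt := PySem.List.sorted pos2 (fun x => x) false
          (kv.2.map (fun p =>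
            (PySem.List.bisectRight srt (p + dist) : Int) -
            (PySem.List.bisectLeft srt (p - dist) : Int))).sum
      results ++ PySem.List.pyRepeat [kv.1] n) []

-- ===== PRECONDITION & SPEC =====
-- Pre_ requires the keys of term2_locs to be distinct — always true of an association list
-- encoding a Python dict; a duplicate-key list is not expressible as a dict input, and on it
-- B's first-match lookup would see only one of the duplicate entries.
def Pre_proximity_2_terms (term1_locs : List (Int × List Int)) (term2_locs : List (Int × List Int)) (dist : Int) (phrase : Bool) : Prop :=
  (term2_locs.map Prod.fst).Nodup
instance (term1_locs : List (Int × List Int)) (term2_locs : List (Int × List Int)) (dist : Int) (phrase : Bool) : Decidable (Pre_proximity_2_terms term1_locs term2_locs dist phrase) := by unfold Pre_proximity_2_terms; infer_instance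
def pvWitness_proximity_2_terms : (List (Int × List Int)) × (List (Int × List Int)) × Int × Bool :=
  ([(1, [1, 2])], [(1, [3])], 2, false)
def Spec_proximity_2_terms (term1_locs : List (Int × List Int)) (term2_locs : List (Int × List Int)) (dist : Int) (phrase : Bool) (out : List Int) : Prop := out = proximity_2_terms_alt term1_locs term2_locs dist phrase
instance (term1_locs : List (Int × List Int)) (term2_locs : List (Int × List Int)) (dist : Int) (phrase : Bool) (out : List Int) : Decidable (Spec_proximity_2_terms term1_locs term2_locs dist phrase out) := by unfold Spec_proximity_2_terms; infer_instance

-- ===== CLAIM (what is proved, stated in full; the proofs are below) =====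
def Claim_equal_proximity_2_terms : Prop := ∀ (term1_locs : List (Int × List Int)) (term2_locs : List (Int × List Int)) (dist : Int) (phrase : Bool), Dom_proximity_2_terms term1_locs term2_locs dist phrase → Pre_proximity_2_terms term1_locs term2_locs dist phrase → Spec_proximity_2_terms term1_locs term2_locs dist phrase (proximity_2_terms term1_locs term2_locs dist phrase)

-- ===== LEMMAS AND PROOFS =====

-- A's pair test, as one Bool
def pvCond (dist : Int) (phrase : Bool) (p q : Int) : Bool :=
  (decide (|p - q| ≤ dist) && !phrase) || ((p - q == -1) && phrase)

-- innermost loop of A: append the doc once per qualifying q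
theorem pv_inner2 (dist : Int) (phrase : Bool) (d p : Int) (ps2 acc : List Int) :
    ps2.foldl (fun r q =>
      if decide (|p - q| ≤ dist) && !phrase then r ++ [d]
      else if (p - q == -1) && phrase then r ++ [d]
      else r) acc
    = acc ++ List.replicate (ps2.countP (pvCond dist phrase p)) d := by
  have h : ps2.foldl (fun r q =>
      if decide (|p - q| ≤ dist) && !phrase then r ++ [d]
      else if (p - q == -1) && phrase then r ++ [d]
      else r) acc
      = ps2.foldl (fun r q => if pvCond dist phrase p q then r ++ [d] else r) acc := by
    apply List.foldl_ext
    intro r q _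
    cases h1 : (decide (|p - q| ≤ dist) && !phrase) <;>
      cases h2 : ((p - q == -1) && phrase) <;>
      simp [pvCond, h1, h2]
  rw [h, PySem.List.foldl_append_if (pvCond dist phrase p) (fun _ => d)]
  congr 1
  rw [List.map_const']
  congr 1
  rw [List.countP_eq_length_filter]

theorem pv_flatMap_replicate {α : Type} (l : List α) (f : α → Nat) (d : Int) :
    l.flatMap (fun p => List.replicate (f p) d) = List.replicate ((l.map f).sum) d := by
  induction l with
  | nil => simp
  | cons x t ih =>
    simp only [List.flatMap_cons, List.map_cons, List.sum_cons, ih, List.replicate_add]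

-- the two position loops of A, for one pair of docs
theorem pv_inner (dist : Int) (phrase : Bool) (d : Int) (ps1 ps2 acc : List Int) :
    ps1.foldl (fun r p =>
      ps2.foldl (fun r q =>
        if decide (|p - q| ≤ dist) && !phrase then r ++ [d]
        else if (p - q == -1) && phrase then r ++ [d]
        else r) r) acc
    = acc ++ List.replicate ((ps1.map (fun p => ps2.countP (pvCond dist phrase p))).sum) d := by
  have h : ps1.foldl (fun r p =>
      ps2.foldl (fun r q =>
        if decide (|p - q| ≤ dist) && !phrase then r ++ [d]
        else if (p - q == -1) && phrase then r ++ [d]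
        else r) r) acc
      = ps1.foldl (fun r p => r ++ List.replicate (ps2.countP (pvCond dist phrase p)) d) acc := by
    apply List.foldl_ext
    intro r p _
    exact pv_inner2 dist phrase d p ps2 r
  rw [h, PySem.List.foldl_append_eq_flatMap, pv_flatMap_replicate]

-- scanning t2 for key d appends nothing when d is absent
theorem pv_scan_no_key (t2 : List (Int × List Int)) (d : Int) (g : List Int → List Int)
    (acc : List Int) (h : d ∉ t2.map Prod.fst) :
    t2.foldl (fun acc kv2 => if d == kv2.1 then acc ++ g kv2.2 else acc) acc = acc := by
  induction t2 generalizing acc with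
  | nil => rfl
  | cons kv rest ih =>
    simp only [List.map_cons, List.mem_cons, not_or] at h
    simp only [List.foldl_cons]
    rw [if_neg (by simpa [beq_iff_eq] using h.1), ih _ h.2]

-- scanning t2 for key d = one dict lookup, when t2 has distinct keys
theorem pv_scan_key (t2 : List (Int × List Int)) (d : Int) (g : List Int → List Int)
    (acc : List Int) (hnd : (t2.map Prod.fst).Nodup) :
    t2.foldl (fun acc kv2 => if d == kv2.1 then acc ++ g kv2.2 else acc) acc
    = acc ++ (match (PySem.Dict.mk t2).get? d with | none => [] | some ps2 => g ps2) := by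
  induction t2 generalizing acc with
  | nil => simp [PySem.Dict.get?]
  | cons kv rest ih =>
    obtain ⟨k, v⟩ := kv
    simp only [List.map_cons, List.nodup_cons] at hnd
    simp only [List.foldl_cons, PySem.Dict.get?_mk_cons]
    by_cases hd : d = k
    · rw [if_pos (by simpa [beq_iff_eq] using hd), if_pos (by simpa [beq_iff_eq] using hd.symm)]
      rw [pv_scan_no_key rest d g _ (hd ▸ hnd.1)]
    · rw [if_neg (by simpa [beq_iff_eq] using hd), if_neg (by simpa [beq_iff_eq] using fun h => hd h.symm)]
      exact ih acc hnd.2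

-- counting by index window
theorem pv_countP_of_indices {α : Type} (p : α → Bool) :
    ∀ (xs : List α) (i j : Nat), i ≤ j → j ≤ xs.length →
      (∀ k (hk : k < xs.length), p xs[k] = decide (i ≤ k ∧ k < j)) → xs.countP p = j - i := by
  intro xs
  induction xs with
  | nil =>
    intro i j hij hj _
    simp only [List.length_nil, Nat.le_zero] at hj
    subst hj
    rw [List.countP_nil]
    omega
  | cons x t ih =>
    intro i j hij hj h
    have h0 := h 0 (by simp)
    simp only [List.getElem_cons_zero] at h0
    by_cases hi : i = 0 ∧ 0 < j
    · have hx : p x = true := by rw [h0]; simpa using hi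
      simp only [List.countP_cons, hx, if_pos]
      have := ih 0 (j - 1) (by omega) (by simp at hj; omega) ?_
      · omega
      · intro k hk
        have := h (k + 1) (by simpa using Nat.succ_lt_succ hk)
        simp only [List.getElem_cons_succ] at this
        rw [this]
        simp only [decide_eq_decide]
        omega
    · have hx : p x = false := by rw [h0]; simpa using hi
      simp only [List.countP_cons, hx, Bool.false_eq_true, if_false, Nat.add_zero]
      by_cases hj0 : j = 0
      · subst hj0
        have hi0 : i = 0 := by omega
        subst hi0
        rw [ih 0 0 le_rfl (by omega) ?_]
        · intro k hk
          have := h (k + 1) (by simpa using Nat.succ_lt_succ hk)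
          simp only [List.getElem_cons_succ] at this
          rw [this]; simp only [decide_eq_decide]; omega
      · have hi' : 0 < i := by omega
        rw [ih (i - 1) (j - 1) (by omega) (by simp at hj; omega) ?_]
        · omega
        · intro k hk
          have := h (k + 1) (by simpa using Nat.succ_lt_succ hk)
          simp only [List.getElem_cons_succ] at this
          rw [this]; simp only [decide_eq_decide]; omega

-- window count on a sorted list = difference of the two bisection points
theorem pv_countP_interval (xs : List Int) (hs : xs.Pairwise (· ≤ ·)) (a b : Int) (hab : a ≤ b) :
    PySem.List.bisectLeft xs a ≤ PySem.List.bisectRight xs b ∧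
    xs.countP (fun q => decide (a ≤ q) && decide (q ≤ b))
      = PySem.List.bisectRight xs b - PySem.List.bisectLeft xs a := by
  obtain ⟨hLlen, hLlt, hLge⟩ := PySem.List.bisectLeft_spec xs a hs
  obtain ⟨hRlen, hRle, hRgt⟩ := PySem.List.bisectRight_spec xs b hs
  have hij : PySem.List.bisectLeft xs a ≤ PySem.List.bisectRight xs b := by
    by_contra hc
    push_neg at hc
    have hlt : PySem.List.bisectRight xs b < xs.length := lt_of_lt_of_le hc hLlen
    have h1 := hLlt _ hlt hc
    have h2 := hRgt _ hlt le_rfl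
    linarith
  refine ⟨hij, ?_⟩
  apply pv_countP_of_indices _ xs _ _ hij hRlen
  intro k hk
  rw [Bool.eq_iff_iff]
  simp only [Bool.and_eq_true, decide_eq_true_eq]
  constructor
  · rintro ⟨h1, h2⟩
    constructor
    · by_contra hc
      push_neg at hc
      have := hLlt k hk hc
      linarith
    · by_contra hc
      push_neg at hc
      have := hRgt k hk hc
      linarith
  · rintro ⟨h1, h2⟩
    exact ⟨hLge k hk h1, hRle k hk h2⟩

theorem pv_bisect_nonpos (xs : List Int) (hs : xs.Pairwise (· ≤ ·)) (a b : Int) (hba : b < a) :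
    PySem.List.bisectRight xs b ≤ PySem.List.bisectLeft xs a := by
  obtain ⟨hLlen, hLlt, hLge⟩ := PySem.List.bisectLeft_spec xs a hs
  obtain ⟨hRlen, hRle, hRgt⟩ := PySem.List.bisectRight_spec xs b hs
  by_contra hc
  push_neg at hc
  have hlt : PySem.List.bisectLeft xs a < xs.length := lt_of_lt_of_le hc hRlen
  have h1 := hLge _ hlt le_rfl
  have h2 := hRle _ hlt hc
  linarith

theorem pv_sum_map_natCast {α : Type} (l : List α) (f : α → Nat) :
    (l.map (fun x => ((f x : Nat) : Int))).sum = ((l.map f).sum : Int) := by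
  induction l with
  | nil => simp
  | cons x t ih => simp [ih]

theorem pv_sum_nonpos (l : List Int) (h : ∀ x ∈ l, x ≤ 0) : l.sum ≤ 0 := by
  induction l with
  | nil => simp
  | cons x t ih =>
    simp only [List.sum_cons]
    have := h x (by simp)
    have := ih (fun y hy => h y (by simp [hy]))
    linarith

-- A's per-doc pair count equals B's per-doc count, as a repetition of the doc
theorem pv_count_eq (dist : Int) (phrase : Bool) (d : Int) (ps1 ps2 : List Int) :
    List.replicate ((ps1.map (fun p => ps2.countP (pvCond dist phrase p))).sum) d
    = PySem.List.pyRepeat [d]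
        (if phrase then
          (ps1.map (fun p => (PySem.Dict.counter ps2).getD (p + 1) 0)).sum
        else
          (ps1.map (fun p =>
            (PySem.List.bisectRight (PySem.List.sorted ps2 (fun x => x) false) (p + dist) : Int) -
            (PySem.List.bisectLeft (PySem.List.sorted ps2 (fun x => x) false) (p - dist) : Int))).sum) := by
  rw [PySem.List.pyRepeat_singleton]
  cases phrase with
  | true =>
    have hcnt : ∀ p : Int, ps2.countP (pvCond dist true p) = ps2.count (p + 1) := by
      intro p
      have : pvCond dist true p = fun q => q == p + 1 := by
        funext q
        simp only [pvCond, Bool.not_true, Bool.and_false, Bool.false_or, Bool.and_true]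
        rw [Bool.eq_iff_iff]
        simp only [beq_iff_eq]
        omega
      rw [this, List.count]
    have hn : (ps1.map (fun p => (PySem.Dict.counter ps2).getD (p + 1) 0)).sum
        = (((ps1.map (fun p => ps2.countP (pvCond dist true p))).sum : Nat) : Int) := by
      rw [← pv_sum_map_natCast]
      congr 1
      apply List.map_congr_left
      intro p _
      rw [PySem.Dict.getD_counter, hcnt p]
    rw [hn]
    simp only [if_true, Int.toNat_natCast]
  | false =>
    simp only [Bool.false_eq_true, if_false]
    have hsorted : (PySem.List.sorted ps2 (fun x => x) false).Pairwise (· ≤ ·) := by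
      have := PySem.List.sorted_pairwise ps2 (fun x => x)
      simpa using this
    have hperm : (PySem.List.sorted ps2 (fun x => x) false).Perm ps2 :=
      PySem.List.sorted_perm ps2 (fun x => x) false
    by_cases hd : 0 ≤ dist
    · have heq : ∀ p : Int,
          ((ps2.countP (pvCond dist false p) : Nat) : Int)
          = (PySem.List.bisectRight (PySem.List.sorted ps2 (fun x => x) false) (p + dist) : Int) -
            (PySem.List.bisectLeft (PySem.List.sorted ps2 (fun x => x) false) (p - dist) : Int) := by
        intro p
        have hpred : pvCond dist false p
            = fun q => decide (p - dist ≤ q) && decide (q ≤ p + dist) := by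
          funext q
          simp only [pvCond, Bool.not_false, Bool.and_true, Bool.and_false, Bool.or_false]
          rw [Bool.eq_iff_iff]
          simp only [Bool.and_eq_true, decide_eq_true_eq, abs_le]
          omega
        obtain ⟨hij, hcount⟩ := pv_countP_interval (PySem.List.sorted ps2 (fun x => x) false)
          hsorted (p - dist) (p + dist) (by omega)
        rw [hpred, ← hperm.countP_eq, hcount]
        omega
      have : (ps1.map (fun p =>
            (PySem.List.bisectRight (PySem.List.sorted ps2 (fun x => x) false) (p + dist) : Int) -
            (PySem.List.bisectLeft (PySem.List.sorted ps2 (fun x => x) false) (p - dist) : Int))).sum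
          = (ps1.map (fun p => ((ps2.countP (pvCond dist false p) : Nat) : Int))).sum := by
        congr 1
        apply List.map_congr_left
        intro p _
        exact (heq p).symm
      rw [this, pv_sum_map_natCast, Int.toNat_natCast]
    · push_neg at hd
      have hzero : ∀ p : Int, ps2.countP (pvCond dist false p) = 0 := by
        intro p
        apply List.countP_eq_zero.mpr
        intro q _
        simp only [pvCond, Bool.not_false, Bool.and_true, Bool.and_false, Bool.or_false]
        simp only [decide_eq_true_eq]
        have := abs_nonneg (p - q)
        omega
      have hS : (ps1.map (fun p => ps2.countP (pvCond dist false p))).sum = 0 := by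
        apply List.sum_eq_zero
        intro x hx
        obtain ⟨p, _, hp⟩ := List.mem_map.mp hx
        rw [← hp, hzero]
      have hn : (ps1.map (fun p =>
            (PySem.List.bisectRight (PySem.List.sorted ps2 (fun x => x) false) (p + dist) : Int) -
            (PySem.List.bisectLeft (PySem.List.sorted ps2 (fun x => x) false) (p - dist) : Int))).sum ≤ 0 := by
        apply pv_sum_nonpos
        intro x hx
        obtain ⟨p, _, hp⟩ := List.mem_map.mp hx
        have := pv_bisect_nonpos (PySem.List.sorted ps2 (fun x => x) false) hsorted
          (p - dist) (p + dist) (by omega)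
        omega
      rw [hS]
      rw [show ((ps1.map (fun p =>
            (PySem.List.bisectRight (PySem.List.sorted ps2 (fun x => x) false) (p + dist) : Int) -
            (PySem.List.bisectLeft (PySem.List.sorted ps2 (fun x => x) false) (p - dist) : Int))).sum).toNat = 0
        from Int.toNat_of_nonpos hn]

-- one step of the outer loop: A's scan of term2 equals B's dict lookup
theorem pv_entry_eq (t2 : List (Int × List Int)) (dist : Int) (phrase : Bool)
    (hnd : (t2.map Prod.fst).Nodup) (kv : Int × List Int) (acc : List Int) :
    t2.foldl (fun results kv2 =>
      if kv.1 == kv2.1 then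
        kv.2.foldl (fun results p =>
          kv2.2.foldl (fun results p2 =>
            if decide (|p - p2| ≤ dist) && !phrase then results ++ [kv.1]
            else if (p - p2 == -1) && phrase then results ++ [kv.1]
            else results) results) results
      else results) acc
    = (match (PySem.Dict.mk t2).get? kv.1 with
      | none => acc
      | some pos2 =>
        let n : Int :=
          if phrase then
            let cnt := PySem.Dict.counter pos2
            (kv.2.map (fun p => cnt.getD (p + 1) 0)).sum
          else
            let srt := PySem.List.sorted pos2 (fun x => x) false
            (kv.2.map (fun p =>
              (PySem.List.bisectRight srt (p + dist) : Int) -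
              (PySem.List.bisectLeft srt (p - dist) : Int))).sum
        acc ++ PySem.List.pyRepeat [kv.1] n) := by
  have h : t2.foldl (fun results kv2 =>
      if kv.1 == kv2.1 then
        kv.2.foldl (fun results p =>
          kv2.2.foldl (fun results p2 =>
            if decide (|p - p2| ≤ dist) && !phrase then results ++ [kv.1]
            else if (p - p2 == -1) && phrase then results ++ [kv.1]
            else results) results) results
      else results) acc
      = t2.foldl (fun results kv2 =>
        if kv.1 == kv2.1 then
          results ++ List.replicate ((kv.2.map (fun p => kv2.2.countP (pvCond dist phrase p))).sum) kv.1
        else results) acc := by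
    apply List.foldl_ext
    intro r kv2 _
    by_cases hk : (kv.1 == kv2.1) = true
    · rw [if_pos hk, if_pos hk, pv_inner]
    · rw [if_neg hk, if_neg hk]
  rw [h, pv_scan_key t2 kv.1
    (fun ps2 => List.replicate ((kv.2.map (fun p => ps2.countP (pvCond dist phrase p))).sum) kv.1)
    acc hnd]
  cases hget : (PySem.Dict.mk t2).get? kv.1 with
  | none => simp
  | some pos2 =>
    simp only []
    rw [pv_count_eq dist phrase kv.1 kv.2 pos2]

-- ===== VERDICT (by name: the statement is the Claim_ definition above) =====
theorem proximity_2_terms_spec : Claim_equal_proximity_2_terms := by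
  intro t1 t2 dist phrase _ hpre
  unfold Spec_proximity_2_terms proximity_2_terms proximity_2_terms_alt
  apply List.foldl_ext
  intro acc kv _
  exact pv_entry_eq t2 dist phrase hpre kv acc
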